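-- pv_equiv track=rewrite | github.com/anh0001/robot-perception-compose | source/utils/openmask_interface.py | _split_query_terms
-- ===== SOURCE A (Python) =====
-- _QUERY_SEPARATORS: tuple[str, ...] = (",", "|")
--
-- def _split_query_terms(item: str) -> list[str]:
--     if not item:
--         return []
--     segments = [item]
--     for separator in _QUERY_SEPARATORS:
--         expanded: list[str] = []
--         for segment in segments:
--             if separator in segment:
--                 expanded.extend(segment.split(separator))
--             else:
--                 expanded.append(segment)
--         segments = expanded
--     terms = [segment.strip() for segment in segments if segment.strip()]
--     fallback = item.strip()
--     return terms or ([fallback] if fallback else ["object"])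
-- ===== SOURCE B (Python) =====
-- def _split_query_terms(item: str) -> list[str]:
--     if not item:
--         return []
--     terms: list[str] = []
--     buf: list[str] = []
--     for ch in item:
--         if ch == "," or ch == "|":
--             t = "".join(buf).strip()
--             if t:
--                 terms.append(t)
--             buf = []
--         else:
--             buf.append(ch)
--     t = "".join(buf).strip()
--     if t:
--         terms.append(t)
--     fallback = item.strip()
--     return terms or ([fallback] if fallback else ["object"])
-- ===== Notes on version B (the rewrite author's own statement) =====
-- stated objective: alternative
-- what changed: Replaces A's per-separator re-splitting passes over a growing segment list (str.split inside nested loops) with a single left-to-right character scan that maintains a buffer and emits each stripped non-empty piece as soon as a separator is reached.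
import Mathlib
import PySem

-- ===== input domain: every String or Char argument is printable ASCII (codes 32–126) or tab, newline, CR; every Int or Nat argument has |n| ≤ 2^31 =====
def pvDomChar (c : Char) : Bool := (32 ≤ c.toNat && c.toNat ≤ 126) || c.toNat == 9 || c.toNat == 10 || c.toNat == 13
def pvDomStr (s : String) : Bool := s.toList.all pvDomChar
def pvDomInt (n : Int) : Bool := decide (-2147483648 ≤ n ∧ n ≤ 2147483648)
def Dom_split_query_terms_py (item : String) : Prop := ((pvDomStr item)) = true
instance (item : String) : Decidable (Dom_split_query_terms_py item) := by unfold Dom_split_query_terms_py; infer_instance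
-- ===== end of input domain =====

-- B replaces A's separator-by-separator re-splitting passes with a single left-to-right
-- character scan maintaining a buffer (objective: alternative decomposition, same cost).

-- ===== PORT A =====
def pvQuerySeparators : List String := [",", "|"]

def split_query_terms_py (item : String) : List String :=
  if item = "" then []
  else
    let segments : List String := [item]
    let segments := pvQuerySeparators.foldl (fun segments separator =>
      segments.foldl (fun expanded segment =>
        if PySem.Str.isIn separator segment then
          expanded ++ ((PySem.Str.split? segment separator).getD [])
        else
          expanded ++ [segment]) []) segments
    let terms := segments.foldl (fun acc segment =>
      if PySem.Str.strip segment ≠ "" then acc ++ [PySem.Str.strip segment] else acc) []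
    let fallback := PySem.Str.strip item
    if terms ≠ [] then terms
    else if fallback ≠ "" then [fallback] else ["object"]

-- ===== PORT B =====
def pvIsSep (ch : Char) : Bool := ch == ',' || ch == '|'

def pvFlush (terms : List String) (buf : List Char) : List String :=
  let t := PySem.Str.strip (String.ofList buf)
  if t ≠ "" then terms ++ [t] else terms

def pvStep (st : List String × List Char) (ch : Char) : List String × List Char :=
  if pvIsSep ch then (pvFlush st.1 st.2, []) else (st.1, st.2 ++ [ch])

def split_query_terms_py_alt (item : String) : List String :=
  if item = "" then []
  else
    let st := item.toList.foldl pvStep ([], [])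
    let terms := pvFlush st.1 st.2
    let fallback := PySem.Str.strip item
    if terms ≠ [] then terms
    else if fallback ≠ "" then [fallback] else ["object"]

-- ===== PRECONDITION & SPEC =====
def Spec_split_query_terms_py (item : String) (out : List String) : Prop := out = split_query_terms_py_alt item
instance (item : String) (out : List String) : Decidable (Spec_split_query_terms_py item out) := by unfold Spec_split_query_terms_py; infer_instance

-- ===== CLAIM (what is proved, stated in full; the proofs are below) =====
def Claim_equal_split_query_terms_py : Prop := ∀ (item : String), Dom_split_query_terms_py item → Spec_split_query_terms_py item (split_query_terms_py item)

-- ===== LEMMAS AND PROOFS =====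

/-- Splitting a char list at every char satisfying `p` (pieces kept, empty pieces included). -/
def pvSplitP (p : Char → Bool) : List Char → List (List Char)
  | [] => [[]]
  | x :: xs => if p x then [] :: pvSplitP p xs else (pvSplitP p xs).modifyHead (x :: ·)

def pvKeep? (cs : List Char) : Option String :=
  if PySem.Chars.strip cs = [] then none else some (String.ofList (PySem.Chars.strip cs))

def pvTermsOf (l : List (List Char)) : List String := l.filterMap pvKeep?

theorem pvSplitP_ne_nil (p : Char → Bool) (l : List Char) : pvSplitP p l ≠ [] := by
  induction l with
  | nil => simp [pvSplitP]
  | cons x xs ih =>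
    simp only [pvSplitP]
    split
    · simp
    · cases h : pvSplitP p xs with
      | nil => exact absurd h ih
      | cons a t => simp

theorem pvSplitP_not_mem (c : Char) (l : List Char) (h : c ∉ l) :
    pvSplitP (· == c) l = [l] := by
  induction l with
  | nil => rfl
  | cons x xs ih =>
    simp only [List.mem_cons, not_or] at h
    have hx : (x == c) = false := by simp [Ne.symm h.1]
    simp [pvSplitP, ih h.2, hx]

theorem pv_modifyHead_triv {α : Type} (l : List α) : l.modifyHead (fun x => x) = l := by
  cases l <;> rfl

theorem pv_go_spec (c : Char) (l : List Char) : ∀ (fuel : Nat) (cur : List Char)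
    (acc : List (List Char)), l.length ≤ fuel →
    PySem.Chars.splitOn.go [c] fuel l cur acc
      = acc.reverse ++ (pvSplitP (· == c) l).modifyHead (cur.reverse ++ ·) := by
  induction l with
  | nil =>
    intro fuel cur acc _
    cases fuel <;> simp [PySem.Chars.splitOn.go, pvSplitP]
  | cons x xs ih =>
    intro fuel cur acc hf
    cases fuel with
    | zero => simp at hf
    | succ f =>
      rw [PySem.Chars.splitOn.go]
      by_cases hx : x = c
      · have hp : [c].isPrefixOf (x :: xs) = true := by simp [List.isPrefixOf, hx]
        rw [hp]
        simp only [if_true, List.length_cons, List.length_nil, Nat.zero_add, List.drop_one,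
          List.tail_cons] at *
        rw [ih f [] (cur.reverse :: acc) (by omega)]
        simp [pvSplitP, hx, pv_modifyHead_triv]
      · have hp : [c].isPrefixOf (x :: xs) = false := by
          have hcx : (c == x) = false := by
            simp only [beq_eq_false_iff_ne, ne_eq]
            exact fun h => hx h.symm
          simp [List.isPrefixOf, hcx]
        rw [hp]
        simp only [Bool.false_eq_true, if_false]
        rw [ih f (x :: cur) acc (by simpa using Nat.le_of_succ_le_succ hf)]
        have hne := pvSplitP_ne_nil (· == c) xs
        cases hs : pvSplitP (· == c) xs with
        | nil => exact absurd hs hne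
        | cons h t =>
          simp [pvSplitP, hx, hs, List.modifyHead]

theorem pv_splitOn_single (c : Char) (l : List Char) :
    PySem.Chars.splitOn l [c] = pvSplitP (· == c) l := by
  unfold PySem.Chars.splitOn
  rw [pv_go_spec c l (l.length + 1) [] [] (by omega)]
  have hne := pvSplitP_ne_nil (· == c) l
  cases hs : pvSplitP (· == c) l with
  | nil => exact absurd hs hne
  | cons h t => simp [List.modifyHead]

theorem pv_isIn_single (c : Char) (l : List Char) :
    PySem.Chars.isIn [c] l = true ↔ c ∈ l := by
  rw [PySem.Chars.isIn_iff_infix]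
  constructor
  · intro h; exact h.mem (List.mem_singleton_self c)
  · intro h; obtain ⟨s, t, rfl⟩ := List.append_of_mem h
    exact ⟨s, t, by simp⟩

/-- One A-pass step, in both branches, is appending the single-char split. -/
theorem pv_stepA (c : Char) (seg : String) (e : List String) :
    (if PySem.Str.isIn (String.ofList [c]) seg then
        e ++ ((PySem.Str.split? seg (String.ofList [c])).getD [])
      else e ++ [seg])
      = e ++ (pvSplitP (· == c) seg.toList).map String.ofList := by
  by_cases h : PySem.Str.isIn (String.ofList [c]) seg = true
  · rw [if_pos h]
    unfold PySem.Str.split? PySem.Chars.split?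
    simp [String.toList_ofList, pv_splitOn_single]
  · rw [if_neg (by simpa using h)]
    unfold PySem.Str.isIn at h
    rw [String.toList_ofList] at h
    have hnm : c ∉ seg.toList := fun hm => h ((pv_isIn_single c seg.toList).2 hm)
    rw [pvSplitP_not_mem c seg.toList hnm]
    simp [String.ofList_toList]

/-- One A-pass (the inner foldl over the segments) maps segment lists through `pvSplitP`. -/
theorem pv_passA (c : Char) (m : List (List Char)) :
    (m.map String.ofList).foldl (fun expanded segment =>
        if PySem.Str.isIn (String.ofList [c]) segment then
          expanded ++ ((PySem.Str.split? segment (String.ofList [c])).getD [])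
        else expanded ++ [segment]) []
      = (m.flatMap (pvSplitP (· == c))).map String.ofList := by
  have h1 : ∀ (e : List String) (seg : String),
      (if PySem.Str.isIn (String.ofList [c]) seg then
          e ++ ((PySem.Str.split? seg (String.ofList [c])).getD [])
        else e ++ [seg])
        = e ++ (pvSplitP (· == c) seg.toList).map String.ofList := fun e seg => pv_stepA c seg e
  calc (m.map String.ofList).foldl (fun expanded segment =>
        if PySem.Str.isIn (String.ofList [c]) segment then
          expanded ++ ((PySem.Str.split? segment (String.ofList [c])).getD [])
        else expanded ++ [segment]) []
      = (m.map String.ofList).foldl (fun expanded segment =>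
          expanded ++ (pvSplitP (· == c) segment.toList).map String.ofList) [] := by
        exact PySem.List.foldl_congr_mem _ _ _ _ (fun e seg _ => h1 e seg)
    _ = (m.map String.ofList).flatMap
          (fun segment => (pvSplitP (· == c) segment.toList).map String.ofList) := by
        rw [PySem.List.foldl_append_eq_flatMap]; simp
    _ = (m.flatMap (pvSplitP (· == c))).map String.ofList := by
        rw [List.flatMap_map]
        simp [List.map_flatMap, String.toList_ofList]

/-- Composing two predicate splits is splitting on the disjunction. -/
theorem pv_splitP_splitP (p q : Char → Bool) (l : List Char) :
    (pvSplitP p l).flatMap (pvSplitP q) = pvSplitP (fun c => p c || q c) l := by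
  induction l with
  | nil => simp [pvSplitP]
  | cons x xs ih =>
    by_cases hp : p x
    · simp [pvSplitP, hp, ih]
    · obtain ⟨h, t, hs⟩ : ∃ h t, pvSplitP p xs = h :: t := by
        cases hs : pvSplitP p xs with
        | nil => exact absurd hs (pvSplitP_ne_nil p xs)
        | cons a b => exact ⟨a, b, rfl⟩
      by_cases hq : q x
      · simp only [pvSplitP, hp, Bool.false_eq_true, if_false, hs, List.modifyHead,
          List.flatMap_cons, pvSplitP, hq, if_true, Bool.or_true]
        rw [List.cons_append, ← List.flatMap_cons, ← hs, ih]
      · simp only [pvSplitP, hp, Bool.false_eq_true, if_false, hs, List.modifyHead,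
          List.flatMap_cons, pvSplitP, hq]
        rw [← ih, hs]
        obtain ⟨h', t', hs'⟩ : ∃ h' t', pvSplitP q h = h' :: t' := by
          cases hs' : pvSplitP q h with
          | nil => exact absurd hs' (pvSplitP_ne_nil q h)
          | cons a b => exact ⟨a, b, rfl⟩
        simp [hs']

/-- A's strip-and-filter comprehension over mapped strings is `pvTermsOf`. -/
theorem pv_termsA (m : List (List Char)) : ∀ (acc : List String),
    (m.map String.ofList).foldl (fun acc segment =>
        if PySem.Str.strip segment ≠ "" then acc ++ [PySem.Str.strip segment] else acc) acc
      = acc ++ pvTermsOf m := by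
  induction m with
  | nil => intro acc; simp [pvTermsOf]
  | cons h t ih =>
    intro acc
    have hstrip : PySem.Str.strip (String.ofList h) = String.ofList (PySem.Chars.strip h) := by
      unfold PySem.Str.strip
      rw [String.toList_ofList]
    by_cases hc : PySem.Chars.strip h = []
    · have : PySem.Str.strip (String.ofList h) = "" := by
        rw [hstrip, hc]
      simp only [List.map_cons, List.foldl_cons, this, ne_eq, not_true_eq_false, if_neg,
        not_false_eq_true, ih]
      simp [pvTermsOf, pvKeep?, hc]
    · have hne : PySem.Str.strip (String.ofList h) ≠ "" := by
        rw [hstrip]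
        intro he
        exact hc (by simpa using congrArg String.toList he)
      simp only [List.map_cons, List.foldl_cons, ne_eq, hne, not_false_eq_true, if_pos, ih]
      simp [pvTermsOf, pvKeep?, hc, hstrip]

theorem pv_flush_eq (terms : List String) (buf : List Char) :
    pvFlush terms buf = terms ++ (pvKeep? buf).toList := by
  unfold pvFlush pvKeep?
  have hstrip : PySem.Str.strip (String.ofList buf) = String.ofList (PySem.Chars.strip buf) := by
    unfold PySem.Str.strip
    rw [String.toList_ofList]
  by_cases hc : PySem.Chars.strip buf = []
  · have : PySem.Str.strip (String.ofList buf) = "" := by rw [hstrip, hc]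
    simp [this, hc]
  · have hne : PySem.Str.strip (String.ofList buf) ≠ "" := by
      rw [hstrip]
      intro he
      exact hc (by simpa using congrArg String.toList he)
    simp [hc, hstrip]

/-- B's character scan computes the terms of the predicate split. -/
theorem pv_scan_spec (cs : List Char) : ∀ (terms : List String) (buf : List Char),
    pvFlush (cs.foldl pvStep (terms, buf)).1 (cs.foldl pvStep (terms, buf)).2
      = terms ++ pvTermsOf ((pvSplitP pvIsSep cs).modifyHead (buf ++ ·)) := by
  induction cs with
  | nil =>
    intro terms buf
    simp only [List.foldl_nil, pv_flush_eq, pvSplitP, List.modifyHead, pvTermsOf]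
    cases hk : pvKeep? buf <;> simp [hk]
  | cons x xs ih =>
    intro terms buf
    by_cases hx : pvIsSep x
    · simp only [List.foldl_cons, pvStep, hx, if_true]
      rw [ih]
      obtain ⟨h, t, hs⟩ : ∃ h t, pvSplitP pvIsSep xs = h :: t := by
        cases hs : pvSplitP pvIsSep xs with
        | nil => exact absurd hs (pvSplitP_ne_nil pvIsSep xs)
        | cons a b => exact ⟨a, b, rfl⟩
      simp only [pvSplitP, hx, if_true, hs, List.modifyHead, pv_flush_eq, pvTermsOf,
        List.filterMap_cons, List.append_nil]
      cases hk : pvKeep? buf <;> cases hk2 : pvKeep? h <;> simp [hk2]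
    · simp only [List.foldl_cons, pvStep, hx, Bool.false_eq_true, if_false]
      rw [ih]
      obtain ⟨h, t, hs⟩ : ∃ h t, pvSplitP pvIsSep xs = h :: t := by
        cases hs : pvSplitP pvIsSep xs with
        | nil => exact absurd hs (pvSplitP_ne_nil pvIsSep xs)
        | cons a b => exact ⟨a, b, rfl⟩
      simp [pvSplitP, hx, hs, List.modifyHead]

-- ===== VERDICT (by name: the statement is the Claim_ definition above) =====
theorem split_query_terms_py_spec : Claim_equal_split_query_terms_py := by
  intro item _
  unfold Spec_split_query_terms_py split_query_terms_py split_query_terms_py_alt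
  by_cases hit : item = ""
  · simp [hit]
  · rw [if_neg hit, if_neg hit]
    dsimp only
    have hcomma : ("," : String) = String.ofList [','] := rfl
    have hbar : ("|" : String) = String.ofList ['|'] := rfl
    have hitem : [item] = ([item.toList]).map String.ofList := by
      simp [String.ofList_toList]
    have hA : pvQuerySeparators.foldl (fun segments separator =>
        segments.foldl (fun expanded segment =>
          if PySem.Str.isIn separator segment then
            expanded ++ ((PySem.Str.split? segment separator).getD [])
          else expanded ++ [segment]) []) [item]
        = (pvSplitP pvIsSep item.toList).map String.ofList := by
      show ([item].foldl (fun expanded segment =>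
          if PySem.Str.isIn "," segment then
            expanded ++ ((PySem.Str.split? segment ",").getD [])
          else expanded ++ [segment]) []).foldl (fun expanded segment =>
          if PySem.Str.isIn "|" segment then
            expanded ++ ((PySem.Str.split? segment "|").getD [])
          else expanded ++ [segment]) []
        = (pvSplitP pvIsSep item.toList).map String.ofList
      rw [hcomma, hitem, pv_passA ',' [item.toList]]
      have h1 : [item.toList].flatMap (pvSplitP (· == ',')) = pvSplitP (· == ',') item.toList := by
        simp
      rw [h1, hbar, pv_passA '|' (pvSplitP (· == ',') item.toList),
        pv_splitP_splitP (· == ',') (· == '|') item.toList]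
      rfl
    rw [hA, pv_termsA (pvSplitP pvIsSep item.toList) [], pv_scan_spec item.toList [] []]
    have hmh : (pvSplitP pvIsSep item.toList).modifyHead (([] : List Char) ++ ·)
        = pvSplitP pvIsSep item.toList := by
      simp [pv_modifyHead_triv]
    rw [hmh]
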